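-- pv_equiv track=rewrite | github.com/chaudhary-keshav/codetrellis-matrix | codetrellis/extractors/python/data/pipeline_extractor.py | _extract_class_body
-- ===== SOURCE A (Python) =====
-- def _extract_class_body(content: str, start: int) -> str:
--     """Extract class body starting from position."""
--     lines = content[start:].split('\n')
--     body_lines = []
--     indent = None
--
--     for line in lines:
--         if not line.strip():
--             body_lines.append(line)
--             continue
--
--         current_spaces = len(line) - len(line.lstrip())
--
--         if indent is None:
--             if current_spaces > 0:
--                 indent = current_spaces
--             else:
--                 break
--
--         if line.strip() and current_spaces < indent:
--             break
--
--         body_lines.append(line)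
--
--     return '\n'.join(body_lines)
-- ===== SOURCE B (Python) =====
-- def _extract_class_body(content: str, start: int) -> str:
--     """Extract class body starting from position (recursive, state-free version)."""
--     return '\n'.join(_body(content[start:].split('\n')))
--
--
-- def _body(lines):
--     # consume leading blank lines; the first non-blank line fixes the body indent
--     if not lines:
--         return []
--     head, rest = lines[0], lines[1:]
--     if not head.strip():
--         return [head] + _body(rest)
--     ind = len(head) - len(head.lstrip())
--     if ind == 0:
--         return []
--     return [head] + _members(ind, rest)
--
--
-- def _members(ind, lines):
--     # keep lines until a non-blank line dedents below ind
--     if not lines: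
--         return []
--     head = lines[0]
--     if head.strip() and len(head) - len(head.lstrip()) < ind:
--         return []
--     return [head] + _members(ind, lines[1:])
-- ===== Notes on version B (the rewrite author's own statement) =====
-- stated objective: alternative
-- what changed: Replaces A's imperative loop with mutable indent/body_lines state and break statements by pure structural recursion on the line list: two state-free recursive functions (one consuming leading blanks and fixing the indent, one taking members) that build the result by consing, with no accumulator and no mutation.
import Mathlib
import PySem

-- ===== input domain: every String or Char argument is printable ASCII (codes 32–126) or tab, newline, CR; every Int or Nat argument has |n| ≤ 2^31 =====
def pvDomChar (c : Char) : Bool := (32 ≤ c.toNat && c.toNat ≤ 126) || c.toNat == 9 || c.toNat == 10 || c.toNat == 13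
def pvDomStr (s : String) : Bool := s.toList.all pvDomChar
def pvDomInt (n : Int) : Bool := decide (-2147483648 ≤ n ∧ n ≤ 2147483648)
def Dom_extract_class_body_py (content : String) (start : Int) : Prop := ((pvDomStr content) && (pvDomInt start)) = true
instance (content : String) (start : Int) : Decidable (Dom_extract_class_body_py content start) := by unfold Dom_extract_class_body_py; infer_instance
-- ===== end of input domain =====

-- B replaces A's imperative loop (mutable indent/body_lines state, break) by pure
-- structural recursion on the line list: two state-free recursive functions building
-- the result by consing, with no accumulator.

-- shared primitive meanings (used verbatim by both ports)
def pvBlank (l : List Char) : Bool := (PySem.Chars.strip l).isEmpty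
def pvIndent (l : List Char) : Nat := l.length - (PySem.Chars.lstrip l).length

-- ===== PORT A =====
-- the for-loop of A: state = remaining lines, current indent (None-able), accumulated body_lines
def pvALoop : List (List Char) → Option Nat → List (List Char) → List (List Char)
  | [], _, acc => acc
  | line :: rest, indent, acc =>
    if pvBlank line then pvALoop rest indent (acc ++ [line])
    else
      let cs := pvIndent line
      match indent with
      | none => if cs > 0 then pvALoop rest (some cs) (acc ++ [line]) else acc
      | some ind => if cs < ind then acc else pvALoop rest (some ind) (acc ++ [line])

def extract_class_body_py (content : String) (start : Int) : String :=
  let lines := PySem.Chars.splitOn (PySem.Chars.slice content.toList (some start) none) ['\n']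
  String.ofList (PySem.Chars.join ['\n'] (pvALoop lines none []))

-- ===== PORT B =====
-- B's _members: keep lines until a non-blank line dedents below ind
def pvBMembers (ind : Nat) : List (List Char) → List (List Char)
  | [] => []
  | l :: rest => if !pvBlank l && pvIndent l < ind then [] else l :: pvBMembers ind rest

-- B's _body: consume leading blanks; first non-blank line fixes the indent
def pvBBody : List (List Char) → List (List Char)
  | [] => []
  | l :: rest =>
    if pvBlank l then l :: pvBBody rest
    else if pvIndent l = 0 then [] else l :: pvBMembers (pvIndent l) rest

def extract_class_body_py_alt (content : String) (start : Int) : String :=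
  String.ofList (PySem.Chars.join ['\n']
    (pvBBody (PySem.Chars.splitOn (PySem.Chars.slice content.toList (some start) none) ['\n'])))

-- ===== PRECONDITION & SPEC =====
def Spec_extract_class_body_py (content : String) (start : Int) (out : String) : Prop := out = extract_class_body_py_alt content start
instance (content : String) (start : Int) (out : String) : Decidable (Spec_extract_class_body_py content start out) := by unfold Spec_extract_class_body_py; infer_instance

-- ===== CLAIM (what is proved, stated in full; the proofs are below) =====
def Claim_equal_extract_class_body_py : Prop := ∀ (content : String) (start : Int), Dom_extract_class_body_py content start → Spec_extract_class_body_py content start (extract_class_body_py content start)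

-- ===== LEMMAS AND PROOFS =====

-- phase 2 of A's loop (indent already set) computes acc ++ B's _members
theorem pvALoop_some (ind : Nat) : ∀ (lines acc : List (List Char)),
    pvALoop lines (some ind) acc = acc ++ pvBMembers ind lines := by
  intro lines
  induction lines with
  | nil => simp [pvALoop, pvBMembers]
  | cons l rest ih =>
      intro acc
      by_cases hb : pvBlank l = true
      · simp [pvALoop, pvBMembers, hb, ih]
      · simp only [pvALoop, pvBMembers, hb]
        by_cases hlt : pvIndent l < ind
        · simp [hlt]
        · simp [hlt, ih]

-- phase 1 of A's loop (indent = None) computes acc ++ B's _body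
theorem pvALoop_none : ∀ (lines acc : List (List Char)),
    pvALoop lines none acc = acc ++ pvBBody lines := by
  intro lines
  induction lines with
  | nil => simp [pvALoop, pvBBody]
  | cons l rest ih =>
      intro acc
      by_cases hb : pvBlank l = true
      · simp [pvALoop, pvBBody, hb, ih]
      · simp only [pvALoop, pvBBody, hb]
        by_cases h0 : pvIndent l = 0
        · simp [h0]
        · have hpos : pvIndent l > 0 := Nat.pos_of_ne_zero h0
          simp [hpos, h0, pvALoop_some]

-- ===== VERDICT (by name: the statement is the Claim_ definition above) =====
theorem extract_class_body_py_spec : Claim_equal_extract_class_body_py := by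
  intro content start _
  unfold Spec_extract_class_body_py extract_class_body_py extract_class_body_py_alt
  simp only []
  rw [pvALoop_none]
  simp
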